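-- pv_equiv track=rewrite | github.com/Moremar/advent_of_code_2023 | day02/part2.py | solve
-- ===== SOURCE A (Python) =====
-- def solve(parsed):
--     res = 0
--     for (i, games) in enumerate(parsed):
--         min_red = min_green = min_blue = 0
--         for game in games:
--             min_red = max(min_red, game[0])
--             min_green = max(min_green, game[1])
--             min_blue = max(min_blue, game[2])
--         res += min_green * min_red * min_blue
--     return res
-- ===== SOURCE B (Python) =====
-- def _top(rounds, key):
--     # rounds is non-empty (it always contains the (0, 0, 0) pad)
--     return sorted(rounds, key=key, reverse=True)[0]
--
--
-- def solve(parsed):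
--     total = 0
--     for game in parsed:
--         rounds = [(0, 0, 0)] + game
--         total += (_top(rounds, lambda t: t[0])[0]
--                   * _top(rounds, lambda t: t[1])[1]
--                   * _top(rounds, lambda t: t[2])[2])
--     return total
-- ===== Notes on version B (the rewrite author's own statement) =====
-- stated objective: alternative
-- what changed: Replaces A's single-pass running triple-accumulator with a sort-then-pick strategy: each game is padded with a (0,0,0) round, sorted descending three times (once per colour key), and the head of each sorted list supplies that colour's minimum cube count.
import Mathlib
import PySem

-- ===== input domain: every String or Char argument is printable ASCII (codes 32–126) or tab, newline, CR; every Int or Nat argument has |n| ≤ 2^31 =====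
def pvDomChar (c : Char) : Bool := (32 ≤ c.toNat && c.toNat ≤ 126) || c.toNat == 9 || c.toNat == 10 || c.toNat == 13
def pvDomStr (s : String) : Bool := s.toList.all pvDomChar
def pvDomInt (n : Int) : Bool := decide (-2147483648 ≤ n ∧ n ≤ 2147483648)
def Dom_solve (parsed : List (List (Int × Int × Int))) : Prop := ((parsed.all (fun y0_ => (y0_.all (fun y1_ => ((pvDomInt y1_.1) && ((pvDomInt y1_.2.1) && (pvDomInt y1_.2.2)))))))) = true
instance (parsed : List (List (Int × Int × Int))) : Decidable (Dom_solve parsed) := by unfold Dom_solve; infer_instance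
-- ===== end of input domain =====

-- B replaces A's single-pass running triple-accumulator with sort-then-pick: each game is
-- padded with a (0,0,0) round, sorted descending once per colour key, and the head of each
-- sorted list supplies that colour's minimum cube count; same results, different mechanism.

-- ===== PORT A =====
-- literal port: outer loop over parsed with accumulator res, inner loop keeping (min_red, min_green, min_blue)
def solve (parsed : List (List (Int × Int × Int))) : Int :=
  parsed.foldl
    (fun res games =>
      let m := games.foldl
        (fun (m : Int × Int × Int) game =>
          (max m.1 game.1, max m.2.1 game.2.1, max m.2.2 game.2.2))
        (0, 0, 0)
      res + m.2.1 * m.1 * m.2.2)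
    0

-- ===== PORT B =====
-- _top(rounds, key) = sorted(rounds, key=key, reverse=True)[0]; rounds is always non-empty
-- (it contains the pad), so the headD default is never reached
def pvTop (rounds : List (Int × Int × Int)) (key : (Int × Int × Int) → Int) : Int × Int × Int :=
  (PySem.List.sorted rounds key true).headD (0, 0, 0)

def solve_alt (parsed : List (List (Int × Int × Int))) : Int :=
  parsed.foldl
    (fun total game =>
      let rounds := (0, 0, 0) :: game
      total + (pvTop rounds (·.1)).1 * (pvTop rounds (·.2.1)).2.1 * (pvTop rounds (·.2.2)).2.2)
    0

-- ===== PRECONDITION & SPEC =====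
def Spec_solve (parsed : List (List (Int × Int × Int))) (out : Int) : Prop := out = solve_alt parsed
instance (parsed : List (List (Int × Int × Int))) (out : Int) : Decidable (Spec_solve parsed out) := by unfold Spec_solve; infer_instance

-- ===== CLAIM (what is proved, stated in full; the proofs are below) =====
def Claim_equal_solve : Prop := ∀ (parsed : List (List (Int × Int × Int))), Dom_solve parsed → Spec_solve parsed (solve parsed)

-- ===== LEMMAS AND PROOFS =====

-- A's inner triple-accumulator fold computes the three column maxima componentwise
lemma inner_fold_eq (games : List (Int × Int × Int)) (a b c : Int) :
    games.foldl
      (fun (m : Int × Int × Int) game =>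
        (max m.1 game.1, max m.2.1 game.2.1, max m.2.2 game.2.2))
      (a, b, c)
    = ((games.map (·.1)).foldl max a,
       (games.map (·.2.1)).foldl max b,
       (games.map (·.2.2)).foldl max c) := by
  induction games generalizing a b c with
  | nil => rfl
  | cons g t ih => simp [List.foldl, ih]

-- the key of the head of the reverse-sorted padded list equals the 0-seeded running max of the column
lemma top_key_eq (game : List (Int × Int × Int)) (key : (Int × Int × Int) → Int)
    (hk : key (0, 0, 0) = 0) :
    key (pvTop ((0, 0, 0) :: game) key) = (game.map key).foldl max 0 := by
  unfold pvTop
  rcases hs : PySem.List.sorted ((0, 0, 0) :: game) key true with _ | ⟨m, t⟩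
  · exact absurd ((PySem.List.sorted_eq_nil_iff _ key true).mp hs) (by simp)
  · have hub : ∀ y ∈ (0, 0, 0) :: game, key y ≤ key m :=
      PySem.List.key_head_sorted_rev_ge _ key hs
    have hmem : m ∈ (0, 0, 0) :: game := by
      have : m ∈ PySem.List.sorted ((0, 0, 0) :: game) key true := by
        rw [hs]; exact List.mem_cons_self
      exact (PySem.List.mem_sorted _ key true m).mp this
    have hfold := PySem.List.le_foldl_max (game.map key) 0
    -- foldl ≤ key m
    have h1 : (game.map key).foldl max 0 ≤ key m := by
      rcases PySem.List.foldl_max_mem (game.map key) 0 with h | h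
      · rw [h]
        have := hub (0, 0, 0) List.mem_cons_self
        omega
      · rcases List.mem_map.mp h with ⟨y, hy, hky⟩
        rw [← hky]
        exact hub y (List.mem_cons_of_mem _ hy)
    -- key m ≤ foldl
    have h2 : key m ≤ (game.map key).foldl max 0 := by
      rcases List.mem_cons.mp hmem with h | h
      · rw [h, hk]; exact hfold.1
      · exact hfold.2 (key m) (List.mem_map.mpr ⟨m, h, rfl⟩)
    simp only [List.headD_cons]
    omega

-- per-game terms agree
lemma term_eq (game : List (Int × Int × Int)) :
    (let m := game.foldl
        (fun (m : Int × Int × Int) g =>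
          (max m.1 g.1, max m.2.1 g.2.1, max m.2.2 g.2.2))
        (0, 0, 0)
     m.2.1 * m.1 * m.2.2)
    = (pvTop ((0, 0, 0) :: game) (·.1)).1
      * (pvTop ((0, 0, 0) :: game) (·.2.1)).2.1
      * (pvTop ((0, 0, 0) :: game) (·.2.2)).2.2 := by
  have h1 := top_key_eq game (·.1) rfl
  have h2 := top_key_eq game (·.2.1) rfl
  have h3 := top_key_eq game (·.2.2) rfl
  simp only [inner_fold_eq, h1, h2, h3]
  ring

lemma solve_eq (parsed : List (List (Int × Int × Int))) :
    solve parsed = solve_alt parsed := by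
  unfold solve solve_alt
  induction parsed using List.reverseRecOn with
  | nil => rfl
  | append_singleton t g ih =>
      simp only [List.foldl_append, List.foldl] at ih ⊢
      rw [ih, term_eq g]

-- ===== VERDICT (by name: the statement is the Claim_ definition above) =====
theorem solve_spec : Claim_equal_solve := by
  intro parsed _
  exact solve_eq parsed
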